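-- pv_equiv track=rewrite | github.com/chouhuishan/it5003 | Kattis/PS3/old_mioi.py | get_original_message
-- ===== SOURCE A (Python) =====
-- def get_original_message(message_list: list[str]) -> str:
--     message = []
--
--     for line in message_list:
--         message.append(line[::-1])
--
--     correct_order = []
--
--     while message:
--         correct_order.append(message.pop())
--     return "".join(correct_order)
-- ===== SOURCE B (Python) =====
-- def get_original_message(message_list: list[str]) -> str:
--     return "".join(message_list)[::-1]
-- ===== Notes on version B (the rewrite author's own statement) =====
-- stated objective: simpler
-- what changed: Replaces the per-line reversal loop and the destructive pop loop with a single concatenation followed by one whole-string slice reversal, using the identity join('')[::-1] = reverse of the concatenation.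
import Mathlib
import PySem

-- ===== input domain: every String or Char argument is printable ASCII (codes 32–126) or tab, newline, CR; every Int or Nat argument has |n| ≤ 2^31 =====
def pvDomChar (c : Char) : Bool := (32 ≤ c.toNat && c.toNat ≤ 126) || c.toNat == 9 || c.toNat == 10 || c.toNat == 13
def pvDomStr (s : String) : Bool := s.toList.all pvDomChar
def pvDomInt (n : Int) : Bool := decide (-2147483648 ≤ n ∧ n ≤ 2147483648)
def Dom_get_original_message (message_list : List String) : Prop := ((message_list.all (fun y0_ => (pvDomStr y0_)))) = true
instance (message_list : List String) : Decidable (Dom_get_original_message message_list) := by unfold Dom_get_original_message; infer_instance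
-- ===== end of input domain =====

-- B replaces A's per-line reversal loop and destructive pop loop by one join followed by one
-- whole-string slice reversal ("".join(message_list)[::-1]); return values agree on all inputs.

-- ===== PORT A =====
-- the 'while message: correct_order.append(message.pop())' loop: pop takes the last element
def pvPopLoop (message correct_order : List String) : List String :=
  if h : message = [] then correct_order
  else pvPopLoop message.dropLast (correct_order ++ [message.getLast h])
termination_by message.length
decreasing_by
  simp only [List.length_dropLast]
  have : message.length ≠ 0 := fun h0 => h (List.eq_nil_of_length_eq_zero h0)
  omega

def get_original_message (message_list : List String) : String :=
  let message := message_list.foldl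
    (fun acc line => acc ++ [((PySem.Str.slice? line none none (-1)).getD "")]) []
  let correct_order := pvPopLoop message []
  PySem.Str.join "" correct_order

-- ===== PORT B =====
def get_original_message_alt (message_list : List String) : String :=
  (PySem.Str.slice? (PySem.Str.join "" message_list) none none (-1)).getD ""

-- ===== PRECONDITION & SPEC =====
def Spec_get_original_message (message_list : List String) (out : String) : Prop := out = get_original_message_alt message_list
instance (message_list : List String) (out : String) : Decidable (Spec_get_original_message message_list out) := by unfold Spec_get_original_message; infer_instance

-- ===== CLAIM (what is proved, stated in full; the proofs are below) =====
def Claim_equal_get_original_message : Prop := ∀ (message_list : List String), Dom_get_original_message message_list → Spec_get_original_message message_list (get_original_message message_list)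

-- ===== LEMMAS AND PROOFS =====

lemma pvPopLoop_eq (message correct_order : List String) :
    pvPopLoop message correct_order = correct_order ++ message.reverse := by
  fun_induction pvPopLoop message correct_order with
  | case1 => simp_all
  | case2 msg acc h ih =>
    rw [ih]
    conv_rhs => rw [← List.dropLast_append_getLast h]
    simp

lemma pvFoldl_map (ml : List String) (f : String → String) (acc : List String) :
    ml.foldl (fun acc line => acc ++ [f line]) acc = acc ++ ml.map f := by
  induction ml generalizing acc with
  | nil => simp
  | cons x xs ih => simp [List.foldl_cons, ih]

lemma pvIntercalate_nil (L : List (List Char)) : List.intercalate [] L = L.flatten := by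
  induction L with
  | nil => simp [List.intercalate]
  | cons x xs ih =>
    cases xs with
    | nil => simp [List.intercalate]
    | cons y ys =>
      simp [List.intercalate, List.intersperse] at ih ⊢
      exact ih

lemma pvJoin_empty_toList (parts : List String) :
    (PySem.Str.join "" parts).toList = (parts.map String.toList).flatten := by
  simp [PySem.Str.toList_join, PySem.Chars.join, pvIntercalate_nil]

lemma pvRevLine (line : String) :
    ((PySem.Str.slice? line none none (-1)).getD "") = String.ofList line.toList.reverse := by
  rw [PySem.Str.slice?_none_none_neg_one]; rfl

-- ===== VERDICT (by name: the statement is the Claim_ definition above) =====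
theorem get_original_message_spec : Claim_equal_get_original_message := by
  intro ml _
  unfold Spec_get_original_message get_original_message get_original_message_alt
  rw [PySem.Str.slice?_none_none_neg_one]
  simp only [Option.getD_some]
  apply String.ext  -- equal toLists
  rw [pvFoldl_map, List.nil_append, pvPopLoop_eq, List.nil_append]
  rw [pvJoin_empty_toList, pvJoin_empty_toList]
  simp only [pvRevLine]
  simp [List.reverse_flatten, Function.comp_def, String.toList_ofList]
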